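-- pv_equiv track=rewrite | github.com/darioradio1man/yandex_training | lesson5/substring_in_string.py | substring
-- ===== SOURCE A (Python) =====
-- def substring(num: int, k: int, word: str):
--     the_dict = dict.fromkeys(word, 0)
--     temp_left, temp_right = 0, 0
--     left_bound, right_bound = 0, 0
--     while temp_right < num:
--         if the_dict[word[temp_right]] < k:
--             if temp_right - temp_left > right_bound - left_bound:
--                 left_bound, right_bound = temp_left, temp_right
--             the_dict[word[temp_right]] += 1
--             temp_right += 1
--         else:
--             temp_left = temp_right - k + 1
--             the_dict = dict.fromkeys(the_dict, 0)
--     return right_bound - left_bound + 1, left_bound + 1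
-- ===== SOURCE B (Python) =====
-- def substring(num: int, k: int, word: str):
--     # Stage 1: only compute the reset points -- the indices where the char just
--     # read has already been seen k times since the previous reset.
--     resets = []
--     cnt = {}
--     for i in range(num):
--         c = word[i]
--         if cnt.get(c, 0) == k:
--             resets.append(i)
--             cnt = {}
--         cnt[c] = cnt.get(c, 0) + 1
--     # Stage 2: each scan segment contributes a single closed-form candidate
--     # window (left bound, last index of the segment); take the first maximum.
--     tls = [0] + [r - k + 1 for r in resets]
--     ends = [r - 1 for r in resets] + [num - 1]
--     best, best_left = 0, 0
--     for tl, end in zip(tls, ends):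
--         if end - tl > best:
--             best, best_left = end - tl, tl
--     return best + 1, best_left + 1
-- ===== Notes on version B (the rewrite author's own statement) =====
-- stated objective: faster
-- what changed: Replaces A's single interleaved while-loop (which tracks the best window online, stalls an iteration on each reset and rebuilds a zero dict over the whole alphabet on every reset) by two staged passes: pass 1 records only the list of reset indices with a lazily built counter, pass 2 derives each segment's single closed-form candidate window and folds max over those O(#resets) candidates; no per-reset alphabet-sized dict rebuild remains.
import Mathlib
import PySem

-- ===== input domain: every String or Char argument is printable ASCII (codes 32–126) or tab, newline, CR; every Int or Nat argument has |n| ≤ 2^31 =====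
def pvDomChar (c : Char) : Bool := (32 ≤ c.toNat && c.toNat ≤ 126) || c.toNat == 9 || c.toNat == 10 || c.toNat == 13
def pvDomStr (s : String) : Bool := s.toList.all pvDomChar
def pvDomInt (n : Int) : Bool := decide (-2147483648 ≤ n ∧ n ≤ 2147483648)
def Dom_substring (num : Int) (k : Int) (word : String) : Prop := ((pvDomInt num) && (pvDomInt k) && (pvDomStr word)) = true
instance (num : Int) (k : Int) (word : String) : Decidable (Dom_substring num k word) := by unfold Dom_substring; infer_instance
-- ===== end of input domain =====

-- B replaces A's single interleaved while-loop (online best tracking, a stalled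
-- iteration and a whole-alphabet dict rebuild on every reset) by two staged passes:
-- pass 1 records only the reset indices, pass 2 folds over one closed-form candidate
-- window per segment; a different decomposition of the same exact result.

-- ===== PORT A =====
-- A's while-loop as structural recursion on a fuel counter; fuel 2*num+1 suffices whenever
-- the Python loop terminates (each index consumes at most two iterations when k ≥ 1);
-- outside Pre_ the Python raises or diverges and nothing is claimed.
-- the_dict[word[temp_right]]: the key is always present (dict.fromkeys(word)), so getD is exact.
def substringLoopA (num k : Int) (w : List Char) (fuel : Nat)
    (d : PySem.Dict Char Int) (tl tr lb rb : Int) : List Int :=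
  match fuel with
  | 0 => [rb - lb + 1, lb + 1]
  | fuel + 1 =>
    if tr < num then
      match PySem.List.pyGet? w tr with
      | none => [rb - lb + 1, lb + 1]   -- IndexError in Python; excluded by Pre_
      | some c =>
        if d.getD c 0 < k then
          let p := if tr - tl > rb - lb then (tl, tr) else (lb, rb)
          substringLoopA num k w fuel (d.insert c (d.getD c 0 + 1)) tl (tr + 1) p.1 p.2
        else
          -- temp_left = temp_right - k + 1; the_dict = dict.fromkeys(the_dict, 0)
          substringLoopA num k w fuel
            (d.keys.foldl (fun d' c' => d'.insert c' 0) PySem.Dict.empty)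
            (tr - k + 1) tr lb rb
    else [rb - lb + 1, lb + 1]

def substring (num : Int) (k : Int) (word : String) : List Int :=
  let d := word.toList.foldl (fun d' c => d'.insert c (0 : Int)) PySem.Dict.empty
  substringLoopA num k word.toList (2 * num.toNat + 1) d 0 0 0 0

-- ===== PORT B =====
-- one step of Source B's stage-1 for-loop; state = (cnt, resets)
def substringScan1 (k : Int) (w : List Char)
    (st : PySem.Dict Char Int × List Int) (i : Int) :
    PySem.Dict Char Int × List Int :=
  match PySem.List.pyGet? w i with
  | none => st   -- IndexError in Python; excluded by Pre_
  | some c =>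
    let q := if st.1.getD c 0 == k
             then ((PySem.Dict.empty : PySem.Dict Char Int), st.2 ++ [i])
             else st
    (q.1.insert c (q.1.getD c 0 + 1), q.2)

-- one step of Source B's stage-2 for-loop; state = (best, best_left), p = (tl, end)
def substringStage2 (st : Int × Int) (p : Int × Int) : Int × Int :=
  if p.2 - p.1 > st.1 then (p.2 - p.1, p.1) else st

def substring_alt (num : Int) (k : Int) (word : String) : List Int :=
  let resets := ((PySem.List.pyRange 0 num 1).foldl (substringScan1 k word.toList)
      (PySem.Dict.empty, [])).2
  let tls := 0 :: resets.map (fun r => r - k + 1)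
  let ends := resets.map (fun r => r - 1) ++ [num - 1]
  let st := (tls.zip ends).foldl substringStage2 (0, 0)
  [st.1 + 1, st.2 + 1]

-- ===== PRECONDITION & SPEC =====
-- Pre_ excludes exactly the inputs where A does not return: num > len(word) with 0 < num
-- (IndexError once temp_right reaches the end) and 0 < num with k < 1 (infinite loop:
-- the reset branch never makes progress).
def Pre_substring (num : Int) (k : Int) (word : String) : Prop :=
  0 < num → (num ≤ (word.toList.length : Int) ∧ 1 ≤ k)
instance (num : Int) (k : Int) (word : String) : Decidable (Pre_substring num k word) := by
  unfold Pre_substring; infer_instance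
def pvWitness_substring : Int × Int × String := (4, 2, "abca")

def Spec_substring (num : Int) (k : Int) (word : String) (out : List Int) : Prop := out = substring_alt num k word
instance (num : Int) (k : Int) (word : String) (out : List Int) : Decidable (Spec_substring num k word out) := by unfold Spec_substring; infer_instance

-- ===== CLAIM (what is proved, stated in full; the proofs are below) =====
def Claim_equal_substring : Prop := ∀ (num : Int) (k : Int) (word : String), Dom_substring num k word → Pre_substring num k word → Spec_substring num k word (substring num k word)

-- ===== LEMMAS AND PROOFS =====

-- the list of segments (tl, last index) that stage 2 of Source B iterates over
def pvSegs (num k tl : Int) (rs : List Int) : List (Int × Int) :=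
  (tl :: rs.map (fun r => r - k + 1)).zip (rs.map (fun r => r - 1) ++ [num - 1])

theorem pvSegs_nil (num k tl : Int) : pvSegs num k tl [] = [(tl, num - 1)] := rfl

theorem pvSegs_cons (num k tl r : Int) (rs : List Int) :
    pvSegs num k tl (r :: rs) = (tl, r - 1) :: pvSegs num k (r - k + 1) rs := rfl

-- Source B's result from a current first-segment left bound, accumulated best and resets
def pvFinish (num k tl b bl : Int) (rs : List Int) : List Int :=
  let st := (pvSegs num k tl rs).foldl substringStage2 (b, bl)
  [st.1 + 1, st.2 + 1]

-- absorbing an online best-update of A into the closed-form fold of B: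
-- updating with candidate (tr - tl) first changes nothing when the first
-- segment already ends at some e ≥ tr.
theorem stage2_absorb (tl tr b bl e : Int) (zs : List (Int × Int)) (he : tr ≤ e) :
    ((tl, e) :: zs).foldl substringStage2
      (if tr - tl > b then ((tr - tl : Int), tl) else (b, bl)) =
    ((tl, e) :: zs).foldl substringStage2 (b, bl) := by
  simp only [List.foldl_cons]
  congr 1
  by_cases h1 : tr - tl > b
  · rw [if_pos h1]
    simp only [substringStage2]
    by_cases h2 : e - tl > tr - tl
    · rw [if_pos h2, if_pos (by omega : e - tl > b)]
    · rw [if_neg h2, if_pos (by omega : e - tl > b)]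
      have h3 : e - tl = tr - tl := by omega
      rw [h3]
  · rw [if_neg h1]

theorem pvFinish_absorb (num k tl tr b bl : Int) (rs : List Int)
    (he : ∀ r ∈ rs, tr < r) (hnum : tr ≤ num - 1) :
    (if tr - tl > b then pvFinish num k tl (tr - tl) tl rs else pvFinish num k tl b bl rs)
      = pvFinish num k tl b bl rs := by
  have key : ∃ e zs, pvSegs num k tl rs = (tl, e) :: zs ∧ tr ≤ e := by
    cases rs with
    | nil => exact ⟨num - 1, [], pvSegs_nil num k tl, hnum⟩
    | cons r rest =>
        refine ⟨r - 1, _, pvSegs_cons num k tl r rest, ?_⟩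
        have := he r (List.mem_cons_self ..)
        omega
  obtain ⟨e, zs, hseg, hetr⟩ := key
  unfold pvFinish
  rw [hseg]
  by_cases h1 : tr - tl > b
  · rw [if_pos h1]
    have := stage2_absorb tl tr b bl e zs hetr
    rw [if_pos h1] at this
    rw [this]
  · rw [if_neg h1]

-- the second component of a stage-1 step either stays or appends the index
theorem scan1_snd (k : Int) (w : List Char) (st : PySem.Dict Char Int × List Int) (i : Int) :
    (substringScan1 k w st i).2 = st.2 ∨ (substringScan1 k w st i).2 = st.2 ++ [i] := by
  unfold substringScan1
  cases PySem.List.pyGet? w i with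
  | none => exact Or.inl rfl
  | some c =>
    by_cases h : (st.1.getD c 0 == k) = true
    · right; simp [h]
    · left; simp [h]

-- the accumulated resets list only passes through: it is a prefix of the result,
-- and neither component depends on it except by that prefix
theorem scan1_shift (k : Int) (w : List Char) (cnt : PySem.Dict Char Int)
    (rs0 : List Int) (i : Int) :
    substringScan1 k w (cnt, rs0) i
      = ((substringScan1 k w (cnt, []) i).1, rs0 ++ (substringScan1 k w (cnt, []) i).2) := by
  unfold substringScan1
  cases PySem.List.pyGet? w i with
  | none => simp
  | some c =>
    by_cases h : (cnt.getD c 0 == k) = true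
    · simp [h]
    · simp [h]

theorem scan1_foldl_shift (k : Int) (w : List Char) (l : List Int) :
    ∀ (cnt : PySem.Dict Char Int) (rs0 : List Int),
    l.foldl (substringScan1 k w) (cnt, rs0)
      = ((l.foldl (substringScan1 k w) (cnt, [])).1,
         rs0 ++ (l.foldl (substringScan1 k w) (cnt, [])).2) := by
  induction l with
  | nil => intro cnt rs0; simp
  | cons i t ih =>
    intro cnt rs0
    simp only [List.foldl_cons]
    rw [scan1_shift k w cnt rs0 i]
    rcases scan1_snd k w (cnt, []) i with h | h
    · rw [h]
      cases hs : substringScan1 k w (cnt, []) i with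
      | mk c1 r1 =>
        have hr1 : r1 = [] := by rw [hs] at h; exact h
        subst hr1
        simp only [List.append_nil]
        rw [ih c1 rs0]
    · rw [h]
      cases hs : substringScan1 k w (cnt, []) i with
      | mk c1 r1 =>
        have hr1 : r1 = [] ++ [i] := by rw [hs] at h; exact h
        simp only [List.nil_append] at hr1
        subst hr1
        simp only [List.nil_append]
        rw [ih c1 (rs0 ++ [i]), ih c1 [i]]
        simp

-- every recorded reset index comes from the scanned range
theorem scan1_mem (k : Int) (w : List Char) (l : List Int) :
    ∀ (cnt : PySem.Dict Char Int) (r : Int),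
      r ∈ (l.foldl (substringScan1 k w) (cnt, [])).2 → r ∈ l := by
  induction l with
  | nil => intro cnt r h; simp at h
  | cons i t ih =>
    intro cnt r h
    simp only [List.foldl_cons] at h
    cases hs : substringScan1 k w (cnt, []) i with
    | mk c1 r1 =>
      rw [hs] at h
      rw [scan1_foldl_shift k w t c1 r1] at h
      simp only [List.mem_append] at h
      rcases h with h | h
      · -- r ∈ r1, and r1 = [] or [i]
        rcases scan1_snd k w (cnt, []) i with h2 | h2 <;> rw [hs] at h2 <;>
          simp only at h2 <;> subst h2 <;> simp at h
        · simp [h]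
      · exact List.mem_cons_of_mem _ (ih c1 r h)

-- all values of a dict built by inserting 0 for every key are 0 (under getD _ 0)
theorem getD_foldl_insert_zero (l : List Char) (d : PySem.Dict Char Int)
    (h : ∀ c, d.getD c 0 = 0) (c : Char) :
    (l.foldl (fun d' c' => d'.insert c' (0 : Int)) d).getD c 0 = 0 := by
  induction l generalizing d with
  | nil => exact h c
  | cons x xs ih =>
    refine ih _ (fun c' => ?_)
    rw [PySem.Dict.getD_insert]
    split <;> simp [h]

-- main correspondence: A's fueled while-loop equals B's staged computation on the
-- remaining indices, given enough fuel and pointwise-equal counters bounded by k.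
theorem loop_eq (num k : Int) (w : List Char) (hk : 1 ≤ k)
    (hlen : num ≤ (w.length : Int)) :
    ∀ (n fuel : Nat) (d cnt : PySem.Dict Char Int) (tl tr lb rb : Int),
      0 ≤ tr → (num - tr).toNat = n → 2 * n < fuel →
      (∀ c, d.getD c 0 = cnt.getD c 0 ∧ d.getD c 0 ≤ k) →
      tr - 1 - tl ≤ rb - lb →
      (num ≤ tr → num - 1 - tl ≤ rb - lb) →
      substringLoopA num k w fuel d tl tr lb rb =
        pvFinish num k tl (rb - lb) lb
          (((PySem.List.pyRange tr num 1).foldl (substringScan1 k w) (cnt, [])).2) := by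
  intro n
  induction n using Nat.strong_induction_on with
  | _ n ih =>
    intro fuel d cnt tl tr lb rb htr hn hfuel hdc ha hb
    obtain ⟨fuel1, rfl⟩ : ∃ f, fuel = f + 1 := ⟨fuel - 1, by omega⟩
    by_cases hlt : tr < num
    · have hget : PySem.List.pyGet? w tr = some (w[tr.toNat]'(by omega)) :=
        PySem.List.pyGet?_eq_some_getElem w htr (by omega)
      rw [PySem.List.pyRange_one_cons hlt]
      simp only [List.foldl_cons]
      set c := w[tr.toNat]'(by omega) with hc
      by_cases hcnt : d.getD c 0 < k
      · -- accept branch: A updates the best online, B's scan records nothing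
        have hne : ¬ ((cnt.getD c 0 == k) = true) := by
          simp only [beq_iff_eq]
          have := (hdc c).1
          omega
        have hstep : substringScan1 k w (cnt, []) tr
            = (cnt.insert c (cnt.getD c 0 + 1), ([] : List Int)) := by
          unfold substringScan1; rw [hget]; simp [hne]
        rw [hstep]
        simp only [substringLoopA, if_pos hlt, hget, if_pos hcnt]
        have hinv : ∀ c', (d.insert c (d.getD c 0 + 1)).getD c' 0
              = (cnt.insert c (cnt.getD c 0 + 1)).getD c' 0
            ∧ (d.insert c (d.getD c 0 + 1)).getD c' 0 ≤ k := by
          intro c'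
          rw [PySem.Dict.getD_insert, PySem.Dict.getD_insert]
          constructor
          · split <;> simp [(hdc _).1]
          · split
            · omega
            · exact (hdc c').2
        have hmemge : ∀ r ∈ ((PySem.List.pyRange (tr+1) num 1).foldl
            (substringScan1 k w) (cnt.insert c (cnt.getD c 0 + 1), [])).2, tr < r := by
          intro r hr
          have := scan1_mem k w _ _ r hr
          rw [PySem.List.mem_pyRange_one] at this
          omega
        by_cases hup : tr - tl > rb - lb
        · rw [if_pos hup]
          have hrec := ih (n - 1) (by omega) fuel1
            (d.insert c (d.getD c 0 + 1)) (cnt.insert c (cnt.getD c 0 + 1))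
            tl (tr + 1) tl tr (by omega) (by omega) (by omega) hinv (by omega) (by omega)
          simp only at hrec
          rw [hrec]
          have habs := pvFinish_absorb num k tl tr (rb - lb) lb
            (((PySem.List.pyRange (tr+1) num 1).foldl (substringScan1 k w)
              (cnt.insert c (cnt.getD c 0 + 1), [])).2) hmemge (by omega)
          rw [if_pos hup] at habs
          rw [← habs]
        · rw [if_neg hup]
          have hrec := ih (n - 1) (by omega) fuel1
            (d.insert c (d.getD c 0 + 1)) (cnt.insert c (cnt.getD c 0 + 1))
            tl (tr + 1) lb rb (by omega) (by omega) (by omega) hinv (by omega) (by omega)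
          simpa using hrec
      · -- reset branch: A stalls one iteration and rebuilds the dict;
        -- B records the reset index, whose segment candidate is a no-op by ha
        have heq : (cnt.getD c 0 == k) = true := by
          simp only [beq_iff_eq]
          have h1 := (hdc c).1
          have h2 := (hdc c).2
          omega
        have hstep : substringScan1 k w (cnt, []) tr
            = ((PySem.Dict.empty : PySem.Dict Char Int).insert c (0 + 1), [tr]) := by
          unfold substringScan1; rw [hget]; simp [heq, PySem.Dict.getD_empty]
        rw [hstep]
        simp only [substringLoopA, if_pos hlt, hget, if_neg hcnt]
        obtain ⟨fuel2, rfl⟩ : ∃ f, fuel1 = f + 1 := ⟨fuel1 - 1, by omega⟩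
        set d0 := d.keys.foldl (fun d' c' => d'.insert c' (0 : Int)) PySem.Dict.empty with hd0
        have hz : ∀ c', d0.getD c' 0 = 0 :=
          getD_foldl_insert_zero _ _ (by simp [PySem.Dict.getD_empty])
        -- A's second iteration at the same index (count is now 0 < k)
        simp only [substringLoopA, if_pos hlt, hget, hz]
        rw [if_pos (show (0:Int) < k by omega)]
        have hinv : ∀ c', (d0.insert c (0 + 1)).getD c' 0
              = ((PySem.Dict.empty : PySem.Dict Char Int).insert c (0 + 1)).getD c' 0
            ∧ (d0.insert c (0 + 1)).getD c' 0 ≤ k := by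
          intro c'
          rw [PySem.Dict.getD_insert, PySem.Dict.getD_insert]
          constructor
          · split <;> simp [hz, PySem.Dict.getD_empty]
          · split
            · omega
            · rw [hz]; omega
        -- B's scan from tr+1 with the fresh counter; shift out the recorded [tr]
        rw [scan1_foldl_shift k w (PySem.List.pyRange (tr+1) num 1)
          ((PySem.Dict.empty : PySem.Dict Char Int).insert c (0 + 1)) [tr]]
        set rs' := ((PySem.List.pyRange (tr+1) num 1).foldl (substringScan1 k w)
          ((PySem.Dict.empty : PySem.Dict Char Int).insert c (0 + 1), [])).2 with hrs'
        have hmemge : ∀ r ∈ rs', tr < r := by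
          intro r hr
          have := scan1_mem k w _ _ r hr
          rw [PySem.List.mem_pyRange_one] at this
          omega
        have hfin : pvFinish num k tl (rb - lb) lb (tr :: rs')
            = pvFinish num k (tr - k + 1) (rb - lb) lb rs' := by
          unfold pvFinish
          rw [pvSegs_cons]
          simp only [List.foldl_cons]
          have : substringStage2 (rb - lb, lb) (tl, tr - 1) = (rb - lb, lb) := by
            simp only [substringStage2]
            rw [if_neg (by omega)]
          rw [this]
        simp only [List.singleton_append]
        rw [hfin]
        by_cases hup : tr - (tr - k + 1) > rb - lb
        · rw [if_pos hup]
          have hrec := ih (n - 1) (by omega) fuel2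
            (d0.insert c (0 + 1)) ((PySem.Dict.empty : PySem.Dict Char Int).insert c (0 + 1))
            (tr - k + 1) (tr + 1) (tr - k + 1) tr (by omega) (by omega) (by omega) hinv
            (by omega) (by omega)
          simp only at hrec
          rw [hrec, ← hrs']
          have habs := pvFinish_absorb num k (tr - k + 1) tr (rb - lb) lb rs' hmemge (by omega)
          rw [if_pos hup] at habs
          rw [← habs]
        · rw [if_neg hup]
          have hrec := ih (n - 1) (by omega) fuel2
            (d0.insert c (0 + 1)) ((PySem.Dict.empty : PySem.Dict Char Int).insert c (0 + 1))
            (tr - k + 1) (tr + 1) lb rb (by omega) (by omega) (by omega) hinv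
            (by omega) (by omega)
          simp only at hrec
          rw [hrec, ← hrs']
    · -- loop finished; the last segment's candidate is already ≤ best by hb
      rw [PySem.List.pyRange_one_eq_nil (by omega)]
      simp only [substringLoopA, if_neg hlt, List.foldl_nil]
      unfold pvFinish
      rw [pvSegs_nil]
      simp only [List.foldl_cons, List.foldl_nil]
      have : substringStage2 (rb - lb, lb) (tl, num - 1) = (rb - lb, lb) := by
        simp only [substringStage2]
        rw [if_neg (by omega)]
      rw [this]

-- substring_alt, seen through pvFinish
theorem alt_eq_finish (num k : Int) (word : String) :
    substring_alt num k word
      = pvFinish num k 0 0 0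
          (((PySem.List.pyRange 0 num 1).foldl (substringScan1 k word.toList)
            (PySem.Dict.empty, [])).2) := rfl

-- ===== VERDICT (by name: the statement is the Claim_ definition above) =====
theorem substring_spec : Claim_equal_substring := by
  intro num k word _ hpre
  unfold Spec_substring substring
  rw [alt_eq_finish]
  by_cases hpos : 0 < num
  · obtain ⟨hlen, hk⟩ := hpre hpos
    exact loop_eq num k word.toList hk hlen num.toNat (2 * num.toNat + 1)
      _ PySem.Dict.empty 0 0 0 0 le_rfl (by omega) (by omega)
      (fun c => ⟨by rw [getD_foldl_insert_zero _ _ (by simp [PySem.Dict.getD_empty]),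
          PySem.Dict.getD_empty],
        by rw [getD_foldl_insert_zero _ _ (by simp [PySem.Dict.getD_empty])]; omega⟩)
      (by omega) (by omega)
  · rw [PySem.List.pyRange_one_eq_nil (by omega)]
    simp only [List.foldl_nil]
    unfold pvFinish
    rw [pvSegs_nil]
    simp only [List.foldl_cons, List.foldl_nil]
    have : substringStage2 (0, 0) ((0 : Int), num - 1) = (0, 0) := by
      simp only [substringStage2]
      rw [if_neg (by omega)]
    rw [this]
    simp [substringLoopA, hpos]
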